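-- pv_equiv track=rewrite | github.com/DKIMDK/SSAFY | algorithm/Aug/0821/Algo1.py | solution
-- ===== SOURCE A (Python) =====
-- def solution(arr):
--     direction = [(0, 1), (1, 0), (0, -1), (-1, 0)]                      # 방향 설정
--     N = len(arr)                                                        # 풍선게임 맵 크기
--     maximum = 0                                                         # 최대점수
--     minimum = 99999                                                     # 최소점수 임의설정 N <=20, Aij <= 9이므로 모든 칸 다 더해도 3600
--     for y in range(N):
--         for x in range(N):                                              # 맵의 각 칸 순회
--             power = arr[y][x]                                           # 풍선이 터질 범위
--             point = arr[y][x]                                           # 현재 점수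
--             for dy, dx in direction:
--                 for i in range(1, power + 1):
--                     ny, nx = y + i * dy, x + i * dx                     # 각 방향을 power만큼 순회
--                     if 0 <= ny < N and 0 <= nx < N:                     # 맵을 벗어나지 않는 선에서
--                         point += arr[ny][nx]                            # 점수 계산
--             if maximum <= point:
--                 maximum = point                                         # 최대점수 계산
--             if minimum >= point:
--                 minimum = point                                         # 최소점수 계산
--     result = maximum - minimum                                          # 최종점수 계산
--     return result
-- ===== SOURCE B (Python) =====
-- def _pref(vals):
--     out = [0]
--     s = 0
--     for v in vals:
--         s += v
--         out.append(s)
--     return out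
--
--
-- def solution(arr):
--     N = len(arr)
--     R = [_pref(row[:N]) for row in arr]
--     C = [_pref([arr[y][x] for y in range(N)]) for x in range(N)]
--     maximum, minimum = 0, 99999
--     for y in range(N):
--         for x in range(N):
--             p = arr[y][x]
--             pe = max(p, 0)
--             Ry, Cx = R[y], C[x]
--             point = (p
--                      + Ry[min(N, x + pe + 1)] - Ry[x + 1]
--                      + Ry[x] - Ry[max(0, x - pe)]
--                      + Cx[min(N, y + pe + 1)] - Cx[y + 1]
--                      + Cx[y] - Cx[max(0, y - pe)])
--             maximum = max(maximum, point)
--             minimum = min(minimum, point)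
--     return maximum - minimum
-- ===== Notes on version B (the rewrite author's own statement) =====
-- stated objective: faster
-- what changed: Replaces the per-cell walk along each of the four directions (a loop of length `power` with bounds checks) by row/column prefix-sum tables, so each cell's score is four O(1) clamped range-sum differences.
import Mathlib
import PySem

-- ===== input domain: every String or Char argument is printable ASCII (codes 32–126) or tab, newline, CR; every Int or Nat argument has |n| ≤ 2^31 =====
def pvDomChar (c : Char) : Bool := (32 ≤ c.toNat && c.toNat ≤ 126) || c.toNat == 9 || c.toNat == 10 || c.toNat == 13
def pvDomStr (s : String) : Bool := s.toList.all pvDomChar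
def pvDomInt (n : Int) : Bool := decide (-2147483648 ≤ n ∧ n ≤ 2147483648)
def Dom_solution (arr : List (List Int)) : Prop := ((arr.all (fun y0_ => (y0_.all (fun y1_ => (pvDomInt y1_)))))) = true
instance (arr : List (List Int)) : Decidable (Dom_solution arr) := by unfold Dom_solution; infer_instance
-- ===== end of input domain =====

-- B replaces A's per-cell directional walk by row/column prefix-sum tables: each cell's
-- score becomes four O(1) clamped range-sum differences; max/min tracking is unchanged.

-- ===== PORT A =====
-- arr[y][x]; every use is guarded (0 ≤ index < N ≤ row length under Pre_), so the default is never read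
def pvAt (arr : List (List Int)) (y x : Int) : Int :=
  PySem.List.pyGetD (PySem.List.pyGetD arr y ([] : List Int)) x 0

def pvDirs : List (Int × Int) := [(0, 1), (1, 0), (0, -1), (-1, 0)]

def solution (arr : List (List Int)) : Int :=
  let N : Int := arr.length
  let st :=
    (PySem.List.pyRange 0 N 1).foldl (fun (s : Int × Int) y =>
      (PySem.List.pyRange 0 N 1).foldl (fun (s : Int × Int) x =>
        let power := pvAt arr y x
        let point :=
          pvDirs.foldl (fun pt d =>
            (PySem.List.pyRange 1 (power + 1) 1).foldl (fun pt i =>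
              let ny := y + i * d.1
              let nx := x + i * d.2
              if 0 ≤ ny ∧ ny < N ∧ 0 ≤ nx ∧ nx < N then pt + pvAt arr ny nx else pt) pt)
            (pvAt arr y x)
        let mx := if s.1 ≤ point then point else s.1
        let mn := if s.2 ≥ point then point else s.2
        (mx, mn)) s) (0, 99999)
  st.1 - st.2

-- ===== PORT B =====
-- _pref(vals): prefix-sum list [0, v0, v0+v1, …]
def pvPref (vals : List Int) : List Int :=
  (vals.foldl (fun (st : List Int × Int) v => (st.1 ++ [st.2 + v], st.2 + v)) ([0], 0)).1

def solution_alt (arr : List (List Int)) : Int :=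
  let N : Int := arr.length
  let R := arr.map (fun row => pvPref (PySem.List.slice row none (some N)))
  let C := (PySem.List.pyRange 0 N 1).map (fun x =>
    pvPref ((PySem.List.pyRange 0 N 1).map (fun y => pvAt arr y x)))
  let st :=
    (PySem.List.pyRange 0 N 1).foldl (fun (s : Int × Int) y =>
      (PySem.List.pyRange 0 N 1).foldl (fun (s : Int × Int) x =>
        let p := pvAt arr y x
        let pe := max p 0
        let Ry := PySem.List.pyGetD R y ([] : List Int)
        let Cx := PySem.List.pyGetD C x ([] : List Int)
        let point := p
          + (PySem.List.pyGetD Ry (min N (x + pe + 1)) 0 - PySem.List.pyGetD Ry (x + 1) 0)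
          + (PySem.List.pyGetD Ry x 0 - PySem.List.pyGetD Ry (max 0 (x - pe)) 0)
          + (PySem.List.pyGetD Cx (min N (y + pe + 1)) 0 - PySem.List.pyGetD Cx (y + 1) 0)
          + (PySem.List.pyGetD Cx y 0 - PySem.List.pyGetD Cx (max 0 (y - pe)) 0)
        (max s.1 point, min s.2 point)) s) (0, 99999)
  st.1 - st.2

-- ===== PRECONDITION & SPEC =====
-- Pre_ excludes exactly the inputs on which A raises IndexError: a row shorter than len(arr).
def Pre_solution (arr : List (List Int)) : Prop :=
  ∀ row ∈ arr, arr.length ≤ row.length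
instance (arr : List (List Int)) : Decidable (Pre_solution arr) := by unfold Pre_solution; infer_instance

def pvWitness_solution : List (List Int) := [[1, 2], [0, 3]]

def Spec_solution (arr : List (List Int)) (out : Int) : Prop := out = solution_alt arr
instance (arr : List (List Int)) (out : Int) : Decidable (Spec_solution arr out) := by unfold Spec_solution; infer_instance

-- ===== CLAIM (what is proved, stated in full; the proofs are below) =====
def Claim_equal_solution : Prop := ∀ (arr : List (List Int)), Dom_solution arr → Pre_solution arr → Spec_solution arr (solution arr)

-- ===== LEMMAS AND PROOFS =====

-- sum of the first k entries (k : Int, read via toNat)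
def pvT (l : List Int) (k : Int) : Int := (l.take k.toNat).sum

-- sum of g over positions lo..hi-1
def pvSeg (g : Int → Int) (lo hi : Int) : Int := ((PySem.List.pyRange lo hi 1).map g).sum

theorem pvSeg_empty (g : Int → Int) (lo hi : Int) (h : hi ≤ lo) : pvSeg g lo hi = 0 := by
  simp [pvSeg, PySem.List.pyRange_one_eq_nil h]

theorem pvSeg_succ_right (g : Int → Int) (lo hi : Int) (h : lo ≤ hi) :
    pvSeg g lo (hi + 1) = pvSeg g lo hi + g hi := by
  simp [pvSeg, PySem.List.pyRange_one_succ_right h]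

theorem pvSeg_cons (g : Int → Int) (lo hi : Int) (h : lo < hi) :
    pvSeg g lo hi = g lo + pvSeg g (lo + 1) hi := by
  simp [pvSeg, PySem.List.pyRange_one_cons h]

theorem pvSeg_congr (g g' : Int → Int) (lo hi : Int)
    (h : ∀ j, lo ≤ j → j < hi → g j = g' j) : pvSeg g lo hi = pvSeg g' lo hi := by
  unfold pvSeg
  congr 1
  exact List.map_congr_left (fun j hj => h j ((PySem.List.mem_pyRange_one.mp hj).1)
    ((PySem.List.mem_pyRange_one.mp hj).2))

-- A's walk in the +1 direction (i = 1..n, position b+i) is the clamped range sum right of b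
theorem pvWalk_pos (g : Int → Int) (N b : Int) (hb0 : 0 ≤ b) (hbN : b < N) :
    ∀ (n : Nat) (a : Int),
      (PySem.List.pyRange 1 ((n : Int) + 1) 1).foldl
        (fun pt i => if 0 ≤ b + i ∧ b + i < N then pt + g (b + i) else pt) a
      = a + pvSeg g (b + 1) (min N (b + 1 + n)) := by
  intro n
  induction n with
  | zero =>
    intro a
    rw [PySem.List.pyRange_one_eq_nil (by omega)]
    rw [pvSeg_empty g _ _ (by omega)]
    simp
  | succ n ih =>
    intro a
    have h1 : (1:Int) ≤ (n:Int) + 1 := by omega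
    rw [show ((n+1 : Nat) : Int) + 1 = ((n:Int)+1) + 1 by push_cast; ring,
        PySem.List.pyRange_one_succ_right h1, List.foldl_append, ih]
    simp only [List.foldl]
    by_cases hc : b + ((n:Int) + 1) < N
    · rw [if_pos ⟨by omega, hc⟩]
      rw [show min N (b + 1 + ((n:Nat)+1:Nat)) = (b + 1 + (n:Nat)) + 1 by omega,
          pvSeg_succ_right g _ _ (by omega),
          show min N (b + 1 + (n:Nat)) = b + 1 + (n:Nat) by omega,
          show b + ((n:Int)+1) = b + 1 + (n:Nat) by omega]
      ring
    · rw [if_neg (by omega)]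
      rw [show min N (b + 1 + ((n:Nat)+1:Nat)) = min N (b + 1 + (n:Nat)) by push_cast at hc ⊢; omega]

-- A's walk in the −1 direction is the clamped range sum left of b
theorem pvWalk_neg (g : Int → Int) (N b : Int) (hb0 : 0 ≤ b) (hbN : b < N) :
    ∀ (n : Nat) (a : Int),
      (PySem.List.pyRange 1 ((n : Int) + 1) 1).foldl
        (fun pt i => if 0 ≤ b - i ∧ b - i < N then pt + g (b - i) else pt) a
      = a + pvSeg g (max 0 (b - n)) b := by
  intro n
  induction n with
  | zero =>
    intro a
    rw [PySem.List.pyRange_one_eq_nil (by omega)]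
    rw [pvSeg_empty g _ _ (by omega)]
    simp
  | succ n ih =>
    intro a
    have h1 : (1:Int) ≤ (n:Int) + 1 := by omega
    rw [show ((n+1 : Nat) : Int) + 1 = ((n:Int)+1) + 1 by push_cast; ring,
        PySem.List.pyRange_one_succ_right h1, List.foldl_append, ih]
    simp only [List.foldl]
    by_cases hc : 0 ≤ b - ((n:Int) + 1)
    · rw [if_pos ⟨hc, by omega⟩]
      have e2 : max 0 (b - ((n+1:Nat):Int)) = b - ((n:Int)+1) := by omega
      have e1 : max 0 (b - ((n:Nat):Int)) = (b - ((n:Int)+1)) + 1 := by omega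
      rw [e2, e1, pvSeg_cons g (b - ((n:Int)+1)) b (by omega)]
      ring
    · rw [if_neg (by omega)]
      rw [show max 0 (b - ((n+1:Nat):Int)) = max 0 (b - ((n:Nat):Int)) by omega]

-- contents of the prefix-sum list
def pvPsums (s : Int) : List Int → List Int
  | [] => []
  | v :: t => (s + v) :: pvPsums (s + v) t

theorem pvPref_foldl (l : List Int) : ∀ (acc : List Int) (s : Int),
    l.foldl (fun (st : List Int × Int) v => (st.1 ++ [st.2 + v], st.2 + v)) (acc, s)
      = (acc ++ pvPsums s l, s + l.sum) := by
  induction l with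
  | nil => intro acc s; simp [pvPsums]
  | cons v t ih => intro acc s; simp [List.foldl, pvPsums, ih]; ring

theorem pvPsums_length (s : Int) (l : List Int) : (pvPsums s l).length = l.length := by
  induction l generalizing s with
  | nil => rfl
  | cons v t ih => simp [pvPsums, ih]

theorem pvPsums_getElem? (l : List Int) : ∀ (s : Int) (k : Nat), k < l.length →
    (pvPsums s l)[k]? = some (s + (l.take (k+1)).sum) := by
  induction l with
  | nil => intro s k h; simp at h
  | cons v t ih =>
    intro s k h
    cases k with
    | zero => simp [pvPsums]
    | succ m =>
      simp only [pvPsums, List.getElem?_cons_succ]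
      rw [ih (s + v) m (by simpa using h)]
      simp [List.take_succ_cons]
      ring

theorem pvPref_getD (l : List Int) (k : Int) (h0 : 0 ≤ k) (hk : k ≤ l.length) :
    PySem.List.pyGetD (pvPref l) k 0 = pvT l k := by
  have hpref : pvPref l = 0 :: pvPsums 0 l := by
    simp [pvPref, pvPref_foldl l [0] 0]
  have hlen : k.toNat < (pvPref l).length := by
    rw [hpref]; simp [pvPsums_length]; omega
  have hq : (pvPref l)[k.toNat]? = some (pvT l k) := by
    rw [hpref]
    rcases Nat.eq_zero_or_pos k.toNat with h | h
    · rw [h]; simp only [List.getElem?_cons_zero]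
      unfold pvT; rw [h]; simp
    · obtain ⟨m, hm⟩ : ∃ m, k.toNat = m + 1 := ⟨k.toNat - 1, by omega⟩
      rw [hm, List.getElem?_cons_succ, pvPsums_getElem? l 0 m (by omega)]
      unfold pvT; rw [hm]; simp
  rw [PySem.List.pyGetD_eq_getElem _ _ h0 (by omega)]
  have := List.getElem?_eq_getElem hlen
  rw [hq] at this
  exact (Option.some.inj this).symm

theorem pvSeg_split (g : Int → Int) (lo mid hi : Int) (h1 : lo ≤ mid) (h2 : mid ≤ hi) :
    pvSeg g lo hi = pvSeg g lo mid + pvSeg g mid hi := by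
  simp [pvSeg, PySem.List.pyRange_one_append lo mid hi h1 h2]

theorem pvSeg_zero_T (l : List Int) : ∀ (m : Nat), m ≤ l.length →
    pvSeg (fun j => PySem.List.pyGetD l j 0) 0 (m : Int) = pvT l m := by
  intro m
  induction m with
  | zero => intro _; rw [pvSeg_empty _ _ _ (by omega)]; simp [pvT]
  | succ m ih =>
    intro h
    rw [show ((m+1 : Nat) : Int) = (m : Int) + 1 by push_cast; ring,
      pvSeg_succ_right _ _ _ (by omega), ih (by omega)]
    simp only [pvT, PySem.List.pyGetD_natCast]
    rw [show ((m:Int)+1).toNat = m + 1 by omega, show ((m:Int)).toNat = m by omega,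
      List.take_add_one]
    have hsome : l[m]? = some l[m] := List.getElem?_eq_getElem (by omega)
    rw [List.sum_append]
    simp [hsome, List.getD_eq_getElem?_getD]

theorem pvSeg_zero_T' (l : List Int) (k : Int) (h0 : 0 ≤ k) (hk : k ≤ l.length) :
    pvSeg (fun j => PySem.List.pyGetD l j 0) 0 k = pvT l k := by
  have h := pvSeg_zero_T l k.toNat (by omega)
  rw [show ((k.toNat : Nat) : Int) = k by omega] at h
  exact h

theorem pvSeg_eq_T (l : List Int) (lo hi : Int) (h0 : 0 ≤ lo) (hlo : lo ≤ hi) (hhi : hi ≤ l.length) :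
    pvSeg (fun j => PySem.List.pyGetD l j 0) lo hi = pvT l hi - pvT l lo := by
  have e1 := pvSeg_zero_T' l hi (by omega) hhi
  have e2 := pvSeg_zero_T' l lo h0 (by omega)
  have hs := pvSeg_split (fun j => PySem.List.pyGetD l j 0) 0 lo hi h0 hlo
  omega

theorem pvT_take (l : List Int) (n : Nat) (k : Int) (hk : k.toNat ≤ n) :
    pvT (l.take n) k = pvT l k := by
  unfold pvT
  rw [List.take_take, show min k.toNat n = k.toNat by omega]

theorem pvRowLen (arr : List (List Int)) (hpre : ∀ row ∈ arr, arr.length ≤ row.length)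
    (y : Int) (hy0 : 0 ≤ y) (hyN : y < (arr.length : Int)) :
    arr.length ≤ (PySem.List.pyGetD arr y ([] : List Int)).length :=
  hpre _ (PySem.List.pyGetD_mem arr ([] : List Int) (by unfold PySem.Raise.InRange; omega))

-- the row of prefix sums B reads, evaluated
theorem pvRowGet (arr : List (List Int)) (hpre : ∀ row ∈ arr, arr.length ≤ row.length)
    (y k : Int) (hy0 : 0 ≤ y) (hyN : y < (arr.length : Int)) (h0 : 0 ≤ k) (hk : k ≤ (arr.length : Int)) :
    PySem.List.pyGetD (PySem.List.pyGetD
        (arr.map (fun row => pvPref (PySem.List.slice row none (some ((arr.length : Nat) : Int))))) y ([] : List Int)) k 0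
      = pvT (PySem.List.pyGetD arr y ([] : List Int)) k := by
  have hyNat : y.toNat < arr.length := by omega
  rw [PySem.List.pyGetD_eq_getElem _ _ hy0 (by simpa using hyN), List.getElem_map]
  have hrow : PySem.List.pyGetD arr y ([] : List Int) = arr[y.toNat] :=
    PySem.List.pyGetD_eq_getElem _ _ hy0 hyN
  have hlenrow : arr.length ≤ arr[y.toNat].length := hpre _ (List.getElem_mem _)
  have hslice : PySem.List.slice arr[y.toNat] none (some ((arr.length : Nat) : Int))
      = arr[y.toNat].take arr.length := by simp [pysem]
  rw [hslice, pvPref_getD _ k h0 (by rw [List.length_take]; push_cast; omega),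
      pvT_take _ _ _ (by omega), hrow]

-- the column of prefix sums B reads, evaluated
theorem pvColGet (arr : List (List Int))
    (x k : Int) (hx0 : 0 ≤ x) (hxN : x < (arr.length : Int)) (h0 : 0 ≤ k) (hk : k ≤ (arr.length : Int)) :
    PySem.List.pyGetD (PySem.List.pyGetD
        ((PySem.List.pyRange 0 ((arr.length : Nat) : Int) 1).map (fun x =>
          pvPref ((PySem.List.pyRange 0 ((arr.length : Nat) : Int) 1).map (fun y => pvAt arr y x)))) x ([] : List Int)) k 0
      = pvT ((PySem.List.pyRange 0 ((arr.length : Nat) : Int) 1).map (fun y => pvAt arr y x)) k := by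
  rw [PySem.List.pyGetD_map_pyRange_of_nonneg _ _ _ _ hx0 hxN]
  rw [pvPref_getD _ k h0
    (by rw [List.length_map, PySem.List.length_pyRange_one]; omega)]

-- length of the column list
theorem pvColLen (arr : List (List Int)) (x : Int) :
    ((PySem.List.pyRange 0 ((arr.length : Nat) : Int) 1).map (fun y => pvAt arr y x)).length
      = arr.length := by
  rw [List.length_map, PySem.List.length_pyRange_one]; omega

-- entries of the column list
theorem pvColEntry (arr : List (List Int)) (x j : Int) (h0 : 0 ≤ j) (hN : j < (arr.length : Int)) :
    PySem.List.pyGetD ((PySem.List.pyRange 0 ((arr.length : Nat) : Int) 1).map (fun y => pvAt arr y x)) j 0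
      = pvAt arr j x :=
  PySem.List.pyGetD_map_pyRange_of_nonneg _ _ _ _ h0 hN

-- direction (0, 1): walk to the right
theorem pvDirR (arr : List (List Int)) (hpre : ∀ row ∈ arr, arr.length ≤ row.length)
    (y x : Int) (m : Nat) (hy0 : 0 ≤ y) (hyN : y < (arr.length : Int)) (hx0 : 0 ≤ x) (hxN : x < (arr.length : Int)) (a : Int) :
    (PySem.List.pyRange 1 ((m : Int) + 1) 1).foldl (fun pt i =>
        if 0 ≤ y + i * 0 ∧ y + i * 0 < ((arr.length : Nat) : Int) ∧
           0 ≤ x + i * 1 ∧ x + i * 1 < ((arr.length : Nat) : Int) then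
          pt + pvAt arr (y + i * 0) (x + i * 1) else pt) a
    = a + (pvT (PySem.List.pyGetD arr y ([] : List Int)) (min ((arr.length : Nat) : Int) (x + m + 1))
         - pvT (PySem.List.pyGetD arr y ([] : List Int)) (x + 1)) := by
  have h1 : (PySem.List.pyRange 1 ((m : Int) + 1) 1).foldl (fun pt i =>
        if 0 ≤ y + i * 0 ∧ y + i * 0 < ((arr.length : Nat) : Int) ∧
           0 ≤ x + i * 1 ∧ x + i * 1 < ((arr.length : Nat) : Int) then
          pt + pvAt arr (y + i * 0) (x + i * 1) else pt) a
      = (PySem.List.pyRange 1 ((m : Int) + 1) 1).foldl (fun pt i =>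
        if 0 ≤ x + i ∧ x + i < ((arr.length : Nat) : Int) then
          pt + (fun j => pvAt arr y j) (x + i) else pt) a := by
    apply PySem.List.foldl_congr_mem
    intro acc i _
    simp only [mul_zero, mul_one, add_zero]
    by_cases hc : 0 ≤ x + i ∧ x + i < ((arr.length : Nat) : Int)
    · rw [if_pos ⟨hy0, hyN, hc.1, hc.2⟩, if_pos hc]
    · rw [if_neg (by tauto), if_neg hc]
  rw [h1, pvWalk_pos (fun j => pvAt arr y j) _ x hx0 hxN m a]
  rw [show x + (m : Int) + 1 = x + 1 + (m : Int) by ring]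
  congr 1
  simp only [pvAt]
  exact pvSeg_eq_T _ _ _ (by omega) (by omega)
    (by have := pvRowLen arr hpre y hy0 hyN; omega)

-- direction (1, 0): walk downwards
theorem pvDirD (arr : List (List Int))
    (y x : Int) (m : Nat) (hy0 : 0 ≤ y) (hyN : y < (arr.length : Int)) (hx0 : 0 ≤ x) (hxN : x < (arr.length : Int)) (a : Int) :
    (PySem.List.pyRange 1 ((m : Int) + 1) 1).foldl (fun pt i =>
        if 0 ≤ y + i * 1 ∧ y + i * 1 < ((arr.length : Nat) : Int) ∧
           0 ≤ x + i * 0 ∧ x + i * 0 < ((arr.length : Nat) : Int) then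
          pt + pvAt arr (y + i * 1) (x + i * 0) else pt) a
    = a + (pvT ((PySem.List.pyRange 0 ((arr.length : Nat) : Int) 1).map (fun y => pvAt arr y x)) (min ((arr.length : Nat) : Int) (y + m + 1))
         - pvT ((PySem.List.pyRange 0 ((arr.length : Nat) : Int) 1).map (fun y => pvAt arr y x)) (y + 1)) := by
  have h1 : (PySem.List.pyRange 1 ((m : Int) + 1) 1).foldl (fun pt i =>
        if 0 ≤ y + i * 1 ∧ y + i * 1 < ((arr.length : Nat) : Int) ∧
           0 ≤ x + i * 0 ∧ x + i * 0 < ((arr.length : Nat) : Int) then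
          pt + pvAt arr (y + i * 1) (x + i * 0) else pt) a
      = (PySem.List.pyRange 1 ((m : Int) + 1) 1).foldl (fun pt i =>
        if 0 ≤ y + i ∧ y + i < ((arr.length : Nat) : Int) then
          pt + (fun j => pvAt arr j x) (y + i) else pt) a := by
    apply PySem.List.foldl_congr_mem
    intro acc i _
    simp only [mul_zero, mul_one, add_zero]
    by_cases hc : 0 ≤ y + i ∧ y + i < ((arr.length : Nat) : Int)
    · rw [if_pos ⟨hc.1, hc.2, hx0, hxN⟩, if_pos hc]
    · rw [if_neg (by tauto), if_neg hc]
  rw [h1, pvWalk_pos (fun j => pvAt arr j x) _ y hy0 hyN m a]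
  rw [show y + (m : Int) + 1 = y + 1 + (m : Int) by ring]
  congr 1
  rw [pvSeg_congr (fun j => pvAt arr j x)
        (fun j => PySem.List.pyGetD ((PySem.List.pyRange 0 ((arr.length : Nat) : Int) 1).map (fun y => pvAt arr y x)) j 0)
        _ _ (fun j hj1 hj2 => (pvColEntry arr x j (by omega) (by omega)).symm)]
  exact pvSeg_eq_T _ _ _ (by omega) (by omega) (by rw [pvColLen]; omega)

-- direction (0, -1): walk to the left
theorem pvDirL (arr : List (List Int)) (hpre : ∀ row ∈ arr, arr.length ≤ row.length)
    (y x : Int) (m : Nat) (hy0 : 0 ≤ y) (hyN : y < (arr.length : Int)) (hx0 : 0 ≤ x) (hxN : x < (arr.length : Int)) (a : Int) :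
    (PySem.List.pyRange 1 ((m : Int) + 1) 1).foldl (fun pt i =>
        if 0 ≤ y + i * 0 ∧ y + i * 0 < ((arr.length : Nat) : Int) ∧
           0 ≤ x + i * -1 ∧ x + i * -1 < ((arr.length : Nat) : Int) then
          pt + pvAt arr (y + i * 0) (x + i * -1) else pt) a
    = a + (pvT (PySem.List.pyGetD arr y ([] : List Int)) x
         - pvT (PySem.List.pyGetD arr y ([] : List Int)) (max 0 (x - m))) := by
  have h1 : (PySem.List.pyRange 1 ((m : Int) + 1) 1).foldl (fun pt i =>
        if 0 ≤ y + i * 0 ∧ y + i * 0 < ((arr.length : Nat) : Int) ∧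
           0 ≤ x + i * -1 ∧ x + i * -1 < ((arr.length : Nat) : Int) then
          pt + pvAt arr (y + i * 0) (x + i * -1) else pt) a
      = (PySem.List.pyRange 1 ((m : Int) + 1) 1).foldl (fun pt i =>
        if 0 ≤ x - i ∧ x - i < ((arr.length : Nat) : Int) then
          pt + (fun j => pvAt arr y j) (x - i) else pt) a := by
    apply PySem.List.foldl_congr_mem
    intro acc i _
    simp only [mul_zero, add_zero]
    rw [show x + i * -1 = x - i by ring]
    by_cases hc : 0 ≤ x - i ∧ x - i < ((arr.length : Nat) : Int)
    · rw [if_pos ⟨hy0, hyN, hc.1, hc.2⟩, if_pos hc]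
    · rw [if_neg (by tauto), if_neg hc]
  rw [h1, pvWalk_neg (fun j => pvAt arr y j) _ x hx0 hxN m a]
  congr 1
  simp only [pvAt]
  exact pvSeg_eq_T _ _ _ (by omega) (by omega)
    (by have := pvRowLen arr hpre y hy0 hyN; omega)

-- direction (-1, 0): walk upwards
theorem pvDirU (arr : List (List Int))
    (y x : Int) (m : Nat) (hy0 : 0 ≤ y) (hyN : y < (arr.length : Int)) (hx0 : 0 ≤ x) (hxN : x < (arr.length : Int)) (a : Int) :
    (PySem.List.pyRange 1 ((m : Int) + 1) 1).foldl (fun pt i =>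
        if 0 ≤ y + i * -1 ∧ y + i * -1 < ((arr.length : Nat) : Int) ∧
           0 ≤ x + i * 0 ∧ x + i * 0 < ((arr.length : Nat) : Int) then
          pt + pvAt arr (y + i * -1) (x + i * 0) else pt) a
    = a + (pvT ((PySem.List.pyRange 0 ((arr.length : Nat) : Int) 1).map (fun y => pvAt arr y x)) y
         - pvT ((PySem.List.pyRange 0 ((arr.length : Nat) : Int) 1).map (fun y => pvAt arr y x)) (max 0 (y - m))) := by
  have h1 : (PySem.List.pyRange 1 ((m : Int) + 1) 1).foldl (fun pt i =>
        if 0 ≤ y + i * -1 ∧ y + i * -1 < ((arr.length : Nat) : Int) ∧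
           0 ≤ x + i * 0 ∧ x + i * 0 < ((arr.length : Nat) : Int) then
          pt + pvAt arr (y + i * -1) (x + i * 0) else pt) a
      = (PySem.List.pyRange 1 ((m : Int) + 1) 1).foldl (fun pt i =>
        if 0 ≤ y - i ∧ y - i < ((arr.length : Nat) : Int) then
          pt + (fun j => pvAt arr j x) (y - i) else pt) a := by
    apply PySem.List.foldl_congr_mem
    intro acc i _
    simp only [mul_zero, add_zero]
    rw [show y + i * -1 = y - i by ring]
    by_cases hc : 0 ≤ y - i ∧ y - i < ((arr.length : Nat) : Int)
    · rw [if_pos ⟨hc.1, hc.2, hx0, hxN⟩, if_pos hc]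
    · rw [if_neg (by tauto), if_neg hc]
  rw [h1, pvWalk_neg (fun j => pvAt arr j x) _ y hy0 hyN m a]
  congr 1
  rw [pvSeg_congr (fun j => pvAt arr j x)
        (fun j => PySem.List.pyGetD ((PySem.List.pyRange 0 ((arr.length : Nat) : Int) 1).map (fun y => pvAt arr y x)) j 0)
        _ _ (fun j hj1 hj2 => (pvColEntry arr x j (by omega) (by omega)).symm)]
  exact pvSeg_eq_T _ _ _ (by omega) (by omega) (by rw [pvColLen]; omega)

-- per-cell equality: A's four directional walks equal B's four prefix-sum differences
theorem pvCell (arr : List (List Int)) (hpre : ∀ row ∈ arr, arr.length ≤ row.length)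
    (y x : Int) (hy0 : 0 ≤ y) (hyN : y < (arr.length : Int)) (hx0 : 0 ≤ x) (hxN : x < (arr.length : Int)) :
    (pvDirs.foldl (fun pt d =>
        (PySem.List.pyRange 1 (pvAt arr y x + 1) 1).foldl (fun pt i =>
          if 0 ≤ y + i * d.1 ∧ y + i * d.1 < ((arr.length : Nat) : Int) ∧
             0 ≤ x + i * d.2 ∧ x + i * d.2 < ((arr.length : Nat) : Int) then
            pt + pvAt arr (y + i * d.1) (x + i * d.2) else pt) pt)
      (pvAt arr y x))
    = pvAt arr y x
      + (PySem.List.pyGetD (PySem.List.pyGetD (arr.map (fun row => pvPref (PySem.List.slice row none (some ((arr.length : Nat) : Int))))) y ([] : List Int)) (min ((arr.length : Nat) : Int) (x + max (pvAt arr y x) 0 + 1)) 0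
         - PySem.List.pyGetD (PySem.List.pyGetD (arr.map (fun row => pvPref (PySem.List.slice row none (some ((arr.length : Nat) : Int))))) y ([] : List Int)) (x + 1) 0)
      + (PySem.List.pyGetD (PySem.List.pyGetD (arr.map (fun row => pvPref (PySem.List.slice row none (some ((arr.length : Nat) : Int))))) y ([] : List Int)) x 0
         - PySem.List.pyGetD (PySem.List.pyGetD (arr.map (fun row => pvPref (PySem.List.slice row none (some ((arr.length : Nat) : Int))))) y ([] : List Int)) (max 0 (x - max (pvAt arr y x) 0)) 0)
      + (PySem.List.pyGetD (PySem.List.pyGetD ((PySem.List.pyRange 0 ((arr.length : Nat) : Int) 1).map (fun x => pvPref ((PySem.List.pyRange 0 ((arr.length : Nat) : Int) 1).map (fun y => pvAt arr y x)))) x ([] : List Int)) (min ((arr.length : Nat) : Int) (y + max (pvAt arr y x) 0 + 1)) 0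
         - PySem.List.pyGetD (PySem.List.pyGetD ((PySem.List.pyRange 0 ((arr.length : Nat) : Int) 1).map (fun x => pvPref ((PySem.List.pyRange 0 ((arr.length : Nat) : Int) 1).map (fun y => pvAt arr y x)))) x ([] : List Int)) (y + 1) 0)
      + (PySem.List.pyGetD (PySem.List.pyGetD ((PySem.List.pyRange 0 ((arr.length : Nat) : Int) 1).map (fun x => pvPref ((PySem.List.pyRange 0 ((arr.length : Nat) : Int) 1).map (fun y => pvAt arr y x)))) x ([] : List Int)) y 0
         - PySem.List.pyGetD (PySem.List.pyGetD ((PySem.List.pyRange 0 ((arr.length : Nat) : Int) 1).map (fun x => pvPref ((PySem.List.pyRange 0 ((arr.length : Nat) : Int) 1).map (fun y => pvAt arr y x)))) x ([] : List Int)) (max 0 (y - max (pvAt arr y x) 0)) 0) := by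
  have hpe : max (pvAt arr y x) 0 = ((pvAt arr y x).toNat : Int) := by omega
  have hrange : PySem.List.pyRange 1 (pvAt arr y x + 1) 1
      = PySem.List.pyRange 1 (((pvAt arr y x).toNat : Int) + 1) 1 := by
    rcases (by omega : 0 ≤ pvAt arr y x ∨ pvAt arr y x < 0) with h | h
    · congr 1; omega
    · rw [PySem.List.pyRange_one_eq_nil (by omega), PySem.List.pyRange_one_eq_nil (by omega)]
  rw [hpe,
      pvRowGet arr hpre y _ hy0 hyN (by omega) (by omega),
      pvRowGet arr hpre y (x+1) hy0 hyN (by omega) (by omega),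
      pvRowGet arr hpre y x hy0 hyN (by omega) (by omega),
      pvRowGet arr hpre y _ hy0 hyN (by omega) (by omega),
      pvColGet arr x _ hx0 hxN (by omega) (by omega),
      pvColGet arr x (y+1) hx0 hxN (by omega) (by omega),
      pvColGet arr x y hx0 hxN (by omega) (by omega),
      pvColGet arr x _ hx0 hxN (by omega) (by omega)]
  simp only [pvDirs, List.foldl]
  rw [hrange,
      pvDirR arr hpre y x _ hy0 hyN hx0 hxN,
      pvDirD arr y x _ hy0 hyN hx0 hxN,
      pvDirL arr hpre y x _ hy0 hyN hx0 hxN,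
      pvDirU arr y x _ hy0 hyN hx0 hxN]
  ring

theorem pvPairStep (a b : Int) (h : a = b) (s : Int × Int) :
    ((if s.1 ≤ a then a else s.1), (if s.2 ≥ a then a else s.2)) = (max s.1 b, min s.2 b) := by
  subst h
  rw [Prod.mk.injEq]
  constructor <;> (split_ifs <;> omega)

-- the two main double folds agree
theorem pvFold_eq (arr : List (List Int)) (hpre : ∀ row ∈ arr, arr.length ≤ row.length) :
    (PySem.List.pyRange 0 ((arr.length : Nat) : Int) 1).foldl (fun (s : Int × Int) y =>
      (PySem.List.pyRange 0 ((arr.length : Nat) : Int) 1).foldl (fun (s : Int × Int) x =>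
        let power := pvAt arr y x
        let point :=
          pvDirs.foldl (fun pt d =>
            (PySem.List.pyRange 1 (power + 1) 1).foldl (fun pt i =>
              let ny := y + i * d.1
              let nx := x + i * d.2
              if 0 ≤ ny ∧ ny < ((arr.length : Nat) : Int) ∧ 0 ≤ nx ∧ nx < ((arr.length : Nat) : Int) then
                pt + pvAt arr ny nx else pt) pt)
            (pvAt arr y x)
        let mx := if s.1 ≤ point then point else s.1
        let mn := if s.2 ≥ point then point else s.2
        (mx, mn)) s) ((0 : Int), (99999 : Int))
    = (PySem.List.pyRange 0 ((arr.length : Nat) : Int) 1).foldl (fun (s : Int × Int) y =>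
      (PySem.List.pyRange 0 ((arr.length : Nat) : Int) 1).foldl (fun (s : Int × Int) x =>
        let p := pvAt arr y x
        let pe := max p 0
        let Ry := PySem.List.pyGetD (arr.map (fun row => pvPref (PySem.List.slice row none (some ((arr.length : Nat) : Int))))) y ([] : List Int)
        let Cx := PySem.List.pyGetD ((PySem.List.pyRange 0 ((arr.length : Nat) : Int) 1).map (fun x =>
          pvPref ((PySem.List.pyRange 0 ((arr.length : Nat) : Int) 1).map (fun y => pvAt arr y x)))) x ([] : List Int)
        let point := p
          + (PySem.List.pyGetD Ry (min ((arr.length : Nat) : Int) (x + pe + 1)) 0 - PySem.List.pyGetD Ry (x + 1) 0)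
          + (PySem.List.pyGetD Ry x 0 - PySem.List.pyGetD Ry (max 0 (x - pe)) 0)
          + (PySem.List.pyGetD Cx (min ((arr.length : Nat) : Int) (y + pe + 1)) 0 - PySem.List.pyGetD Cx (y + 1) 0)
          + (PySem.List.pyGetD Cx y 0 - PySem.List.pyGetD Cx (max 0 (y - pe)) 0)
        (max s.1 point, min s.2 point)) s) ((0 : Int), (99999 : Int)) := by
  apply PySem.List.foldl_congr_mem'
  intro y hy s
  apply PySem.List.foldl_congr_mem'
  intro x hx s'
  rw [PySem.List.mem_pyRange_one] at hy hx
  dsimp only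
  exact pvPairStep _ _ (pvCell arr hpre y x hy.1 hy.2 hx.1 hx.2) s'

-- ===== VERDICT (by name: the statement is the Claim_ definition above) =====
theorem solution_spec : Claim_equal_solution := by
  intro arr _ hpre
  unfold Spec_solution
  have h := pvFold_eq arr hpre
  exact congrArg₂ HSub.hSub (congrArg Prod.fst h) (congrArg Prod.snd h)
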